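-- pv_equiv track=rewrite | github.com/TMazenge/Color-Plosion-Project | Color Plosion/board.py | x_match_made
-- ===== SOURCE A (Python) =====
-- def x_match_made(grid):
-- 	"""Checks to see if match of 3 adjacent numbers in the same
-- 	   row has been made.
--
-- 	Args:
-- 		grid: New created grid.
--
-- 	Returns:
-- 		A boolean value whether a match had been made in the row.
-- 	"""
-- 	for row in range(len(grid)):
-- 		for col in range(len(grid[row]) - 2):
-- 			# Accesses three adjacent numbers in the same row.
-- 			x_col1 = grid[row][col]
-- 			x_col2 = grid[row][col + 1]
-- 			x_col3 = grid[row][col + 2]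
-- 			# Returns True if the numbers match.
-- 			if x_col1 == x_col2 and x_col2 == x_col3:
-- 				return True
-- 	return False
-- ===== SOURCE B (Python) =====
-- def x_match_made(grid):
--     for row in grid:
--         count = 1
--         prev = None
--         for v in row:
--             if prev is not None and v == prev:
--                 count += 1
--                 if count >= 3:
--                     return True
--             else:
--                 count = 1
--             prev = v
--     return False
-- ===== Notes on version B (the rewrite author's own statement) =====
-- stated objective: idiomatic
-- what changed: Replaces the index-based triple-window test (grid[row][col..col+2]) with a direct left-to-right scan of each row maintaining a running count of consecutive equal values, returning True when the run length reaches 3.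
import Mathlib
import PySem

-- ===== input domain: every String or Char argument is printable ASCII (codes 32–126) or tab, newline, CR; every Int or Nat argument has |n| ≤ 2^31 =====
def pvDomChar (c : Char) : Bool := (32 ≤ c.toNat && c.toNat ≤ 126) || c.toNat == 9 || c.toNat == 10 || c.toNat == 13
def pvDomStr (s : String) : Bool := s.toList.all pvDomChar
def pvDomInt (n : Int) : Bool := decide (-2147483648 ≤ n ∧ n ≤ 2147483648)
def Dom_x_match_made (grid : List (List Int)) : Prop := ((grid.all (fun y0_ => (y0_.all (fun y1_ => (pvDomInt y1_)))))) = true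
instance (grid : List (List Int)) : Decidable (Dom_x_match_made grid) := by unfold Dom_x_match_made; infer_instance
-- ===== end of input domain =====

-- B replaces A's index-based triple-window test with a running count of consecutive
-- equal values per row (idiomatic rewrite; same asymptotic cost).

-- ===== PORT A =====
-- for row in range(len(grid)): for col in range(len(grid[row]) - 2): test three adjacent cells
def x_match_made (grid : List (List Int)) : Bool :=
  (List.range grid.length).any (fun row =>
    let r := grid[row]?.getD []
    (List.range (r.length - 2)).any (fun col =>
      let x_col1 := r[col]?.getD 0
      let x_col2 := r[col + 1]?.getD 0
      let x_col3 := r[col + 2]?.getD 0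
      x_col1 == x_col2 && x_col2 == x_col3))

-- ===== PORT B =====
-- scan of one row: prev = last seen value (none at start), count = current run length
def xRunScan (prev : Option Int) (count : Nat) : List Int → Bool
  | [] => false
  | v :: rest =>
    match prev with
    | some p =>
      if v = p then
        if count + 1 ≥ 3 then true else xRunScan (some v) (count + 1) rest
      else xRunScan (some v) 1 rest
    | none => xRunScan (some v) 1 rest

def x_match_made_alt (grid : List (List Int)) : Bool :=
  grid.any (fun row => xRunScan none 1 row)

-- ===== PRECONDITION & SPEC =====
def Spec_x_match_made (grid : List (List Int)) (out : Bool) : Prop := out = x_match_made_alt grid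
instance (grid : List (List Int)) (out : Bool) : Decidable (Spec_x_match_made grid out) := by unfold Spec_x_match_made; infer_instance

-- ===== CLAIM (what is proved, stated in full; the proofs are below) =====
def Claim_equal_x_match_made : Prop := ∀ (grid : List (List Int)), Dom_x_match_made grid → Spec_x_match_made grid (x_match_made grid)

-- ===== LEMMAS AND PROOFS =====

-- common characterisation: some three adjacent equal values, structurally
def xTriple : List Int → Bool
  | a :: b :: c :: rest => (a == b && b == c) || xTriple (b :: c :: rest)
  | _ => false

theorem xRunScan_eq_triple (xs : List Int) :
    (∀ p, xRunScan (some p) 1 xs = xTriple (p :: xs)) ∧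
    (∀ p, xRunScan (some p) 2 xs = xTriple (p :: p :: xs)) := by
  induction xs with
  | nil => constructor <;> intro p <;> simp [xRunScan, xTriple]
  | cons v rest ih =>
    obtain ⟨ih1, ih2⟩ := ih
    constructor
    · intro p
      by_cases h : v = p
      · subst h
        have hL : xRunScan (some v) 1 (v :: rest) = xRunScan (some v) 2 rest := by
          simp [xRunScan]
        rw [hL, ih2 v]
      · cases rest with
        | nil => simp [xRunScan, xTriple, h]
        | cons w rest' =>
          have hL : xRunScan (some p) 1 (v :: w :: rest') = xRunScan (some v) 1 (w :: rest') := by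
            simp [xRunScan, h]
          have hR : xTriple (p :: v :: w :: rest') =
              ((p == v && v == w) || xTriple (v :: w :: rest')) := by
            simp [xTriple]
          have hpv : (p == v) = false := by simp [Ne.symm h]
          rw [hL, ih1 v, hR, hpv]
          simp
    · intro p
      by_cases h : v = p
      · subst h
        have hL : xRunScan (some v) 2 (v :: rest) = true := by simp [xRunScan]
        rw [hL]
        simp [xTriple]
      · cases rest with
        | nil => simp [xRunScan, xTriple, h, Ne.symm h]
        | cons w rest' =>
          have hL : xRunScan (some p) 2 (v :: w :: rest') = xRunScan (some v) 1 (w :: rest') := by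
            simp [xRunScan, h]
          have hR : xTriple (p :: p :: v :: w :: rest') =
              ((p == p && p == v) ||
               ((p == v && v == w) || xTriple (v :: w :: rest'))) := by
            simp [xTriple]
          have hpv : (p == v) = false := by simp [Ne.symm h]
          rw [hL, ih1 v, hR, hpv]
          simp

theorem rowB_eq_triple (row : List Int) : xRunScan none 1 row = xTriple row := by
  cases row with
  | nil => simp [xRunScan, xTriple]
  | cons v rest =>
    have : xRunScan none 1 (v :: rest) = xRunScan (some v) 1 rest := by simp [xRunScan]
    rw [this, (xRunScan_eq_triple rest).1 v]

theorem rowA_eq_triple (r : List Int) :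
    (List.range (r.length - 2)).any (fun col =>
      (r[col]?.getD 0 == r[col + 1]?.getD 0) &&
      (r[col + 1]?.getD 0 == r[col + 2]?.getD 0)) = xTriple r := by
  induction r with
  | nil => simp [xTriple]
  | cons a rest ih =>
    cases rest with
    | nil => simp [xTriple]
    | cons b rest' =>
      cases rest' with
      | nil => simp [xTriple]
      | cons c rest'' =>
        have hlen : (a :: b :: c :: rest'').length - 2 = (b :: c :: rest'').length - 2 + 1 := by
          simp
        rw [hlen, List.range_succ_eq_map, List.any_cons, List.any_map]
        have hx : xTriple (a :: b :: c :: rest'') =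
            ((a == b && b == c) || xTriple (b :: c :: rest'')) := by simp [xTriple]
        rw [hx, ← ih]
        simp [Function.comp_def]

theorem gridA_any (grid : List (List Int)) :
    x_match_made grid = grid.any (fun r =>
      (List.range (r.length - 2)).any (fun col =>
        (r[col]?.getD 0 == r[col + 1]?.getD 0) &&
        (r[col + 1]?.getD 0 == r[col + 2]?.getD 0))) := by
  unfold x_match_made
  induction grid with
  | nil => simp
  | cons r rest ih =>
    rw [List.length_cons, List.range_succ_eq_map, List.any_cons, List.any_map, List.any_cons]
    rw [← ih]
    simp [Function.comp_def]

-- ===== VERDICT (by name: the statement is the Claim_ definition above) =====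
theorem x_match_made_spec : Claim_equal_x_match_made := by
  intro grid _
  unfold Spec_x_match_made x_match_made_alt
  rw [gridA_any]
  refine List.any_congr rfl ?_
  intro r
  rw [rowA_eq_triple, rowB_eq_triple]
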